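-- pv_equiv track=rewrite | github.com/sanskritistha/Python | ContainAtleast2Vowel.py | vow
-- ===== SOURCE A (Python) =====
-- def vow(countries):
--     vowel=('a','e','i','o','u')
--     a=[]
--     for country in countries:
--         count=0
--         for char in country.lower():
--           if char in vowel:
--             count+=1
--         if count>=2:
--              a.append(country)
--     return a
-- ===== SOURCE B (Python) =====
-- def vow(countries):
--     # per-vowel substring counts instead of a per-character scan
--     return [c for c in countries
--             if sum(c.lower().count(v) for v in 'aeiou') >= 2]
-- ===== Notes on version B (the rewrite author's own statement) =====
-- stated objective: idiomatic
-- what changed: Replaces the per-character membership loop and accumulator with a list comprehension that sums five str.count calls (one scan per vowel) on the lowered string.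
import Mathlib
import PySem

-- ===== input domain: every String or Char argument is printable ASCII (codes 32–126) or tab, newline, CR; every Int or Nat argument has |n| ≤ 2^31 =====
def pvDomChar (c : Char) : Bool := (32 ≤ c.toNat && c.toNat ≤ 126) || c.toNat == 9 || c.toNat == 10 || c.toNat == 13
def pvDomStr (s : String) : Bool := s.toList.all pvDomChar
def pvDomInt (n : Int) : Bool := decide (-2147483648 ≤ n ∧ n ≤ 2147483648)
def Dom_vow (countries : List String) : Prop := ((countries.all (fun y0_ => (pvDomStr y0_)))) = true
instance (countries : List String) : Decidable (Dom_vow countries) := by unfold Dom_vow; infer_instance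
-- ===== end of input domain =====

-- B filters with a sum of five per-vowel str.count calls on the lowered string instead of A's per-character membership loop (idiomatic rewrite, same cost).

-- ===== PORT A =====
-- vowel = ('a','e','i','o','u')
def vowTupleA : List Char := ['a', 'e', 'i', 'o', 'u']

-- inner loop: count = 0; for char in country.lower(): if char in vowel: count += 1
def vowCountA (country : String) : Int :=
  (PySem.Str.lower country).toList.foldl
    (fun count char => if char ∈ vowTupleA then count + 1 else count) 0

def vow (countries : List String) : List String :=
  countries.foldl
    (fun a country => if vowCountA country ≥ 2 then a ++ [country] else a) []

-- ===== PORT B =====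
-- sum(c.lower().count(v) for v in 'aeiou')
def vowTotalB (c : String) : Int :=
  (("aeiou" : String).toList.map
    (fun v => (PySem.Str.count (PySem.Str.lower c) (String.mk [v]) : Int))).sum

def vow_alt (countries : List String) : List String :=
  countries.filter (fun c => decide (vowTotalB c ≥ 2))

-- ===== PRECONDITION & SPEC =====
def Spec_vow (countries : List String) (out : List String) : Prop := out = vow_alt countries
instance (countries : List String) (out : List String) : Decidable (Spec_vow countries out) := by unfold Spec_vow; infer_instance

-- ===== CLAIM (what is proved, stated in full; the proofs are below) =====
def Claim_equal_vow : Prop := ∀ (countries : List String), Dom_vow countries → Spec_vow countries (vow countries)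

-- ===== LEMMAS AND PROOFS =====

-- Chars.count with a single-character pattern is plain element counting.
theorem charsCount_go_singleton (v : Char) (l : List Char) (fuel : Nat) (acc : Nat)
    (h : l.length ≤ fuel) :
    PySem.Chars.count.go [v] fuel l acc = acc + l.count v := by
  induction l generalizing fuel acc with
  | nil => cases fuel <;> simp [PySem.Chars.count.go]
  | cons hd t ih =>
    cases fuel with
    | zero => simp at h
    | succ fuel =>
      have ht : t.length ≤ fuel := by simpa using h
      by_cases hv : v = hd
      · subst hv
        simp [PySem.Chars.count.go, List.isPrefixOf, ih _ _ ht]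
        omega
      · have hpre : ([v].isPrefixOf (hd :: t)) = false := by
          simp [List.isPrefixOf]
          exact fun h' => hv (by simpa using h')
        have hbeq : (hd == v) = false := by
          simp; exact fun h' => hv h'.symm
        simp [PySem.Chars.count.go, hpre, ih _ _ ht, List.count_cons, hbeq]

theorem charsCount_singleton (cs : List Char) (v : Char) :
    PySem.Chars.count cs [v] = cs.count v := by
  simp [PySem.Chars.count, charsCount_go_singleton v cs cs.length 0 le_rfl]

-- summing counts over a Nodup target list, cons step on the counted list
theorem sum_count_cons (ch : Char) (t : List Char) :
    ∀ vs : List Char, vs.Nodup →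
      (vs.map (fun v => (ch :: t).count v)).sum
        = (vs.map (fun v => t.count v)).sum + (if ch ∈ vs then 1 else 0) := by
  intro vs
  induction vs with
  | nil => simp
  | cons v vs' ih =>
    intro hv
    obtain ⟨hnm, hv'⟩ := List.nodup_cons.mp hv
    by_cases hc : ch = v
    · subst hc
      have hmap : (vs'.map (fun v => (ch :: t).count v)) = vs'.map (fun v => t.count v) := by
        apply List.map_congr_left
        intro x hx
        have hne : (ch == x) = false := by
          simp; exact fun h => hnm (h ▸ hx)
        simp [List.count_cons, hne]
      rw [List.map_cons, List.map_cons, List.sum_cons, List.sum_cons, hmap]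
      simp
      omega
    · have h1 : (ch :: t).count v = t.count v := by
        have : (ch == v) = false := by simp; exact hc
        simp [List.count_cons, this]
      have h2 := ih hv'
      by_cases hm : ch ∈ vs' <;> simp [h1, h2, hm, hc] <;> omega

-- countP against a Nodup list of targets = the sum of the individual counts
theorem countP_mem_eq_sum_counts (vs : List Char) (hv : vs.Nodup) (l : List Char) :
    l.countP (fun ch => decide (ch ∈ vs)) = (vs.map (fun v => l.count v)).sum := by
  induction l with
  | nil => simp
  | cons ch t ih =>
    rw [List.countP_cons, sum_count_cons ch t vs hv, ← ih]
    by_cases hm : ch ∈ vs <;> simp [hm]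

-- the per-element predicates of the two ports agree
theorem pred_eq (c : String) : (vowCountA c ≥ 2) ↔ (vowTotalB c ≥ 2) := by
  have hA : vowCountA c
      = ((PySem.Str.lower c).toList.countP (fun ch => decide (ch ∈ vowTupleA)) : Int) := by
    unfold vowCountA
    rw [PySem.List.foldl_ite_add_one (fun ch => ch ∈ vowTupleA)]
    simp
  have hB : vowTotalB c
      = ((vowTupleA.map (fun v => (PySem.Str.lower c).toList.count v)).sum : Int) := by
    unfold vowTotalB
    have : (("aeiou" : String).toList) = vowTupleA := by decide
    rw [this, Nat.cast_list_sum, List.map_map]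
    apply congrArg
    apply List.map_congr_left
    intro v _
    have hm : (String.mk [v]).toList = [v] := Eq.symm ((fun {l} {s} => String.ofList_eq.mp) rfl)
    rw [PySem.Str.count_eq, PySem.Str.toList_lower, hm, charsCount_singleton]
    rfl
  rw [hA, hB, countP_mem_eq_sum_counts vowTupleA (by decide)]

theorem vow_spec : Claim_equal_vow := by
  intro countries _
  unfold Spec_vow vow vow_alt
  have := PySem.List.foldl_append_if (fun c => decide (vowCountA c ≥ 2)) (id : String → String)
    countries []
  simp only [decide_eq_true_eq, id] at this
  rw [this, List.map_id]
  apply congrArg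
  apply List.filter_congr
  intro c _
  simp [pred_eq c]
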